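-- pv_equiv track=rewrite | github.com/jgrar/aoc | 2018/08/b/main.py | treeval
-- ===== SOURCE A (Python) =====
-- def treeval (tree):
--
-- 	v = 0
-- 	n = tree.pop(0)
-- 	z = tree.pop(0)
--
-- 	if n:
-- 		s = []
-- 		for _ in range(n):
-- 			s.append(treeval(tree))
--
-- 		for _ in range(z):
-- 			x = tree.pop(0) - 1
--
-- 			if 0 <= x < len(s):
-- 				v += s[x]
--
-- 	else:
-- 		for _ in range(z):
-- 			v += tree.pop(0)
--
-- 	return v
-- ===== SOURCE B (Python) =====
-- def treeval(tree):
--     stack = []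
--     while True:
--         n = tree.pop(0)
--         z = tree.pop(0)
--         if n:
--             stack.append((n, z, []))
--             v = None
--         else:
--             v = sum([tree.pop(0) for _ in range(z)])
--         while True:
--             if v is None:
--                 n2, z2, s = stack[-1]
--                 if len(s) < n2:
--                     break
--                 stack.pop()
--                 meta = [tree.pop(0) for _ in range(z2)]
--                 v = sum(s[x - 1] for x in meta if 1 <= x <= len(s))
--             else:
--                 if not stack:
--                     return v
--                 stack[-1][2].append(v)
--                 v = None
-- ===== Notes on version B (the rewrite author's own statement) =====
-- stated objective: alternative
-- what changed: Replaces A's recursive descent over the tree encoding with an iterative outer loop driving an explicit stack of (children-needed, metadata-count, child-values) frames, attaching each finished node's value upward in an inner resolve loop; pops happen in the identical front order, so mutation of the argument and IndexError timing are unchanged.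
import Mathlib
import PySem

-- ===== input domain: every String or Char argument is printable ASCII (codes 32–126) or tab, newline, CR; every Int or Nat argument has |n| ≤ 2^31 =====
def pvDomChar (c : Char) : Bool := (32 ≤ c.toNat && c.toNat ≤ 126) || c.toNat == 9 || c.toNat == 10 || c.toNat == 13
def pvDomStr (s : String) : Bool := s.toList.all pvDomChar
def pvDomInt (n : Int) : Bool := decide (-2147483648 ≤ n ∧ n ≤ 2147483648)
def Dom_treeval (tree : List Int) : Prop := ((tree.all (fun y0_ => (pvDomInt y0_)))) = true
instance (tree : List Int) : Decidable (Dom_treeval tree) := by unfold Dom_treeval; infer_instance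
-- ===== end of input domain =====

-- Equivalence is about the RETURN value only: both Pythons pop the whole node prefix
-- off the front of `tree` in the same order (callers observe the same mutation).
-- B evaluates the tree iteratively with an explicit stack of frames instead of recursion.

-- ===== PORT A =====
-- A raises IndexError when a pop hits the empty list: each helper returns `none`
-- exactly there (excluded by Pre_); the dummy 0 at the top level is never claimed about.

-- leafA k t v: the `for _ in range(z): v += tree.pop(0)` loop (k = max z 0 iterations)
def leafA : Nat → List Int → Int → Option (Int × List Int)
  | 0, t, v => some (v, t)
  | _+1, [], _ => none
  | k+1, m :: t, v => leafA k t (v + m)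

-- metaA k s t v: the indexed-metadata loop `x = tree.pop(0) - 1; if 0 <= x < len(s): v += s[x]`
def metaA : Nat → List Int → List Int → Int → Option (Int × List Int)
  | 0, _, t, v => some (v, t)
  | _+1, _, [], _ => none
  | k+1, s, m :: t, v =>
      metaA k s t (if 0 ≤ m - 1 ∧ m - 1 < (s.length : Int) then v + s.getD (m - 1).toNat 0 else v)

mutual
-- goA fuel t: one recursive call of Python's treeval; fuel only bounds the recursion
-- depth (fuel = t.length + 1 is always enough, each node consumes ≥ 2 elements).
def goA : Nat → List Int → Option (Int × List Int)
  | 0, _ => none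
  | fuel+1, n :: z :: t =>
      if n ≠ 0 then
        -- `for _ in range(n)` runs max n 0 = n.toNat times
        match kidsA fuel n.toNat t [] with
        | none => none
        | some (s, t1) => metaA z.toNat s t1 0
      else leafA z.toNat t 0
  | _+1, _ => none
  termination_by fuel _ => (fuel, 0)

-- kidsA fuel k t s: the `s.append(treeval(tree))` loop
def kidsA : Nat → Nat → List Int → List Int → Option (List Int × List Int)
  | _, 0, t, s => some (s, t)
  | fuel, k+1, t, s =>
      match goA fuel t with
      | none => none
      | some (v, t1) => kidsA fuel k t1 (s ++ [v])
  termination_by fuel k _ _ => (fuel, k+1)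
end

def treeval (tree : List Int) : Int :=
  match goA (tree.length + 1) tree with
  | some (v, _) => v
  | none => 0

-- ===== PORT B =====
-- B's frames: (n, z, children-values-so-far), top of stack first.

-- `meta = [tree.pop(0) for _ in range(z)]; v = sum(meta)` — pops z.toNat items or raises
def metaSumB (z : Int) (t : List Int) : Option (Int × List Int) :=
  if z.toNat ≤ t.length then some ((t.take z.toNat).sum, t.drop z.toNat) else none

-- `meta = [tree.pop(0) for _ in range(z2)]; v = sum(s[x-1] for x in meta if 1 <= x <= len(s))`
def metaIdxB (z : Int) (s : List Int) (t : List Int) : Option (Int × List Int) :=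
  if z.toNat ≤ t.length then
    some ((((t.take z.toNat).filter
        (fun m => decide (1 ≤ m ∧ m ≤ (s.length : Int)))).map
        (fun m => s.getD (m - 1).toNat 0)).sum,
      t.drop z.toNat)
  else none

-- the inner resolve loop, once a finished value v is in hand (`else:` branch upward):
-- return it, or attach it to the top frame and keep resolving completed frames
def attachB : List Int → List (Int × Int × List Int) → Int →
    Option (Sum Int (List Int × List (Int × Int × List Int)))
  | _, [], v => some (.inl v)
  | t, (n, z, s) :: st, v =>
      let s' := s ++ [v]
      if (s'.length : Int) < n then some (.inr (t, (n, z, s') :: st))  -- break: read more nodes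
      else match metaIdxB z s' t with
        | none => none
        | some (v', t') => attachB t' st v'

mutual
-- goB: the outer `while True` loop; one fuel per iteration (= per node read)
def goB : Nat → List Int → List (Int × Int × List Int) → Option Int
  | 0, _, _ => none
  | fuel+1, n :: z :: t, st =>
      if n ≠ 0 then
        if 0 < n then goB fuel t ((n, z, []) :: st)        -- frame incomplete: break inner loop
        else contB fuel (metaIdxB z [] t) st               -- n < 0: frame complete at once, s = []
      else contB fuel (metaSumB z t) st
  | _+1, _, _ => none
  termination_by fuel _ _ => (fuel, 0)

def contB : Nat → Option (Int × List Int) → List (Int × Int × List Int) → Option Int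
  | _, none, _ => none
  | fuel, some (v, t), st =>
      match attachB t st v with
      | none => none
      | some (.inl r) => some r
      | some (.inr (t', st')) => goB fuel t' st'
  termination_by fuel _ _ => (fuel, 1)
end

def treeval_alt (tree : List Int) : Int :=
  match goB (tree.length + 1) tree [] with
  | some v => v
  | none => 0

-- ===== PRECONDITION & SPEC =====
-- Pre_ excludes exactly the inputs on which Python's treeval raises IndexError (pop from
-- an exhausted list): those lists that do not start with a complete node encoding.
-- chkNode is the well-formedness grammar of the input (node := n z node^(max n 0) int^(max z 0)),
-- returning the leftover suffix; it checks shape only and computes no values. The fuel is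
-- tree.length + 1, always enough since every node starts with two header entries.
def chkStep (c : List Int → Option (List Int)) : Nat → List Int → Option (List Int)
  | 0, t => some t
  | k+1, t =>
      match c t with
      | none => none
      | some t1 => chkStep c k t1

def chkNode : Nat → List Int → Option (List Int)
  | 0, _ => none
  | fuel+1, n :: z :: t =>
      match chkStep (chkNode fuel) n.toNat t with
      | none => none
      | some t1 => if z.toNat ≤ t1.length then some (t1.drop z.toNat) else none
  | _+1, _ => none

def Pre_treeval (tree : List Int) : Prop := (chkNode (tree.length + 1) tree).isSome = true
instance (tree : List Int) : Decidable (Pre_treeval tree) := by unfold Pre_treeval; infer_instance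

def pvWitness_treeval : List Int := [2, 3, 0, 3, 10, 11, 12, 1, 1, 0, 1, 99, 2, 1, 1, 2]

def Spec_treeval (tree : List Int) (out : Int) : Prop := out = treeval_alt tree
instance (tree : List Int) (out : Int) : Decidable (Spec_treeval tree out) := by unfold Spec_treeval; infer_instance

-- ===== CLAIM (what is proved, stated in full; the proofs are below) =====
def Claim_equal_treeval : Prop :=
  ∀ (tree : List Int), Dom_treeval tree → Pre_treeval tree → Spec_treeval tree (treeval tree)

-- ===== LEMMAS AND PROOFS =====

lemma leafA_eq (k : Nat) : ∀ (t : List Int) (v : Int),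
    leafA k t v = if k ≤ t.length then some (v + (t.take k).sum, t.drop k) else none := by
  induction k with
  | zero => intro t v; simp [leafA]
  | succ k ih =>
    intro t v
    cases t with
    | nil => simp [leafA]
    | cons m t => simp [leafA, ih, add_assoc]

lemma metaA_eq (s : List Int) (k : Nat) : ∀ (t : List Int) (v : Int),
    metaA k s t v =
      if k ≤ t.length then
        some (v + (((t.take k).filter
            (fun m => decide (1 ≤ m ∧ m ≤ (s.length : Int)))).map
            (fun m => s.getD (m - 1).toNat 0)).sum, t.drop k)
      else none := by
  induction k with
  | zero => intro t v; simp [metaA]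
  | succ k ih =>
    intro t v
    cases t with
    | nil => simp [metaA]
    | cons m t =>
      by_cases h : 1 ≤ m ∧ m ≤ (s.length : Int)
      · simp [metaA, ih, h, add_assoc]
      · simp [metaA, ih, h]

lemma metaSumB_len {z : Int} {t : List Int} {v : Int} {t' : List Int}
    (h : metaSumB z t = some (v, t')) : t'.length ≤ t.length := by
  unfold metaSumB at h
  split at h
  · injection h with h; injection h with h1 h2
    subst h2
    simp
  · exact absurd h (by simp)

lemma metaIdxB_len {z : Int} {s t : List Int} {v : Int} {t' : List Int}
    (h : metaIdxB z s t = some (v, t')) : t'.length ≤ t.length := by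
  unfold metaIdxB at h
  split at h
  · injection h with h; injection h with h1 h2
    subst h2
    simp
  · exact absurd h (by simp)

lemma leafA_eq_metaSumB (z : Int) (t : List Int) : leafA z.toNat t 0 = metaSumB z t := by
  simp [leafA_eq, metaSumB]

lemma metaA_eq_metaIdxB (z : Int) (s t : List Int) : metaA z.toNat s t 0 = metaIdxB z s t := by
  simp [metaA_eq, metaIdxB]

-- joint length bound: a successful parse consumes at least the two header entries
lemma lenA : ∀ (ℓ : Nat),
    (∀ (t : List Int) (f : Nat) (v : Int) (t' : List Int), t.length ≤ ℓ →
      goA f t = some (v, t') → t'.length + 2 ≤ t.length) ∧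
    (∀ (k : Nat) (t s : List Int) (f : Nat) (s' t' : List Int), t.length ≤ ℓ →
      kidsA f k t s = some (s', t') → t'.length ≤ t.length) := by
  intro ℓ
  induction ℓ using Nat.strong_induction_on with
  | _ ℓ IH =>
    have hA : ∀ (t : List Int) (f : Nat) (v : Int) (t' : List Int), t.length ≤ ℓ →
        goA f t = some (v, t') → t'.length + 2 ≤ t.length := by
      intro t f v t' hlen h
      match f, t with
      | 0, _ => simp [goA] at h
      | f+1, [] => simp [goA] at h
      | f+1, [n] => simp [goA] at h
      | f+1, n :: z :: t =>
        simp only [goA] at h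
        by_cases hn : n ≠ 0
        · rw [if_pos hn] at h
          cases hk : kidsA f n.toNat t [] with
          | none => rw [hk] at h; simp at h
          | some p =>
            obtain ⟨s1, t1⟩ := p
            rw [hk] at h
            have ht1 : t1.length ≤ t.length := by
              rcases Nat.eq_zero_or_pos ℓ with h0 | hpos
              · simp at hlen; omega
              · exact (IH (ℓ-1) (by omega)).2 n.toNat t [] f s1 t1 (by simp at hlen; omega) hk
            simp only [metaA_eq] at h
            split at h
            · simp at h
              have : t' = t1.drop z.toNat := h.2.symm
              subst this
              simp only [List.length_drop, List.length_cons]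
              omega
            · simp at h
        · rw [if_neg hn] at h
          rw [leafA_eq] at h
          split at h
          · simp at h
            have : t' = t.drop z.toNat := h.2.symm
            subst this
            simp only [List.length_drop, List.length_cons]
            omega
          · simp at h
    refine ⟨hA, ?_⟩
    intro k
    induction k with
    | zero => intro t s f s' t' hlen h; simp [kidsA] at h; simp [h.2.symm]
    | succ k ihk =>
      intro t s f s' t' hlen h
      simp only [kidsA] at h
      cases hg : goA f t with
      | none => rw [hg] at h; simp at h
      | some p =>
        obtain ⟨v, t1⟩ := p
        rw [hg] at h
        have h1 : t1.length + 2 ≤ t.length := hA t f v t1 hlen hg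
        have h2 : t'.length ≤ t1.length := by
          rcases Nat.eq_zero_or_pos ℓ with h0 | hpos
          · omega
          · exact (IH (ℓ-1) (by omega)).2 k t1 (s ++ [v]) f s' t' (by omega) h
        omega

lemma goA_len {t : List Int} {f : Nat} {v : Int} {t' : List Int}
    (h : goA f t = some (v, t')) : t'.length + 2 ≤ t.length :=
  (lenA t.length).1 t f v t' le_rfl h

lemma attachB_inr_len : ∀ (st : List (Int × Int × List Int)) (t : List Int) (v : Int)
    (t' : List Int) (st' : List (Int × Int × List Int)),
    attachB t st v = some (.inr (t', st')) → t'.length ≤ t.length := by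
  intro st
  induction st with
  | nil => intro t v t' st' h; simp [attachB] at h
  | cons fr st ih =>
    intro t v t' st' h
    obtain ⟨n, z, s⟩ := fr
    simp only [attachB] at h
    split at h
    · simp at h; simp [h.1.symm]
    · cases hm : metaIdxB z (s ++ [v]) t with
      | none => rw [hm] at h; simp at h
      | some p =>
        obtain ⟨v2, t2⟩ := p
        rw [hm] at h
        exact le_trans (ih t2 v2 t' st' h) (metaIdxB_len hm)

-- fuel-independence: any fuel exceeding the list length gives the same parse result
lemma stabA : ∀ (ℓ : Nat),
    (∀ (t : List Int) (f g : Nat), t.length ≤ ℓ → t.length < f → t.length < g →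
      goA f t = goA g t) ∧
    (∀ (k : Nat) (t s : List Int) (f g : Nat), t.length ≤ ℓ → t.length < f → t.length < g →
      kidsA f k t s = kidsA g k t s) := by
  intro ℓ
  induction ℓ using Nat.strong_induction_on with
  | _ ℓ IH =>
    have hA : ∀ (t : List Int) (f g : Nat), t.length ≤ ℓ → t.length < f → t.length < g →
        goA f t = goA g t := by
      intro t f g hlen hf hg
      match f, g, t with
      | f+1, g+1, [] => simp [goA]
      | f+1, g+1, [n] => simp [goA]
      | f+1, g+1, n :: z :: t =>
        simp only [List.length_cons] at hlen hf hg
        have ht : kidsA f n.toNat t [] = kidsA g n.toNat t [] :=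
          (IH (ℓ-1) (by omega)).2 n.toNat t [] f g (by omega) (by omega) (by omega)
        simp only [goA, ht]
    refine ⟨hA, ?_⟩
    intro k
    induction k with
    | zero => intro t s f g hlen hf hg; simp [kidsA]
    | succ k ihk =>
      intro t s f g hlen hf hg
      simp only [kidsA]
      rw [hA t f g hlen hf hg]
      cases hg' : goA g t with
      | none => rfl
      | some p =>
        obtain ⟨v, t1⟩ := p
        have h1 := goA_len hg'
        exact ihk t1 (s ++ [v]) f g (by omega) (by omega) (by omega)

-- the value a goB configuration computes, expressed through goA (proof-side only)
def Rspec (t : List Int) (st : List (Int × Int × List Int)) : Option Int :=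
  match goA (t.length + 1) t with
  | none => none
  | some (v, t') =>
    match attachB t' st v with
    | none => none
    | some (.inl r) => some r
    | some (.inr (t2, st2)) => goB (t2.length + 1) t2 st2

-- main simulation: goB on any configuration equals its goA-denotation; second component
-- handles an open frame (n, z, s) with k children still to read
lemma mainL : ∀ (ℓ : Nat),
    (∀ (t : List Int) (st : List (Int × Int × List Int)) (f : Nat),
      t.length ≤ ℓ → t.length < f → goB f t st = Rspec t st) ∧
    (∀ (t : List Int) (st : List (Int × Int × List Int)) (n z : Int) (s : List Int) (k g : Nat),
      t.length ≤ ℓ → t.length < g → 1 ≤ k → ((s.length + k : Nat) : Int) = n →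
      goB (t.length + 1) t ((n, z, s) :: st) =
        match kidsA g k t s with
        | none => none
        | some (s', t1) =>
          match metaIdxB z s' t1 with
          | none => none
          | some (v, t') =>
            match attachB t' st v with
            | none => none
            | some (.inl r) => some r
            | some (.inr (t2, st2)) => goB (t2.length + 1) t2 st2) := by
  intro ℓ
  induction ℓ using Nat.strong_induction_on with
  | _ ℓ IH =>
    have hL : ∀ (t : List Int) (st : List (Int × Int × List Int)) (f : Nat),
        t.length ≤ ℓ → t.length < f → goB f t st = Rspec t st := by
      intro t st f hlen hf
      match f, t with
      | f+1, [] => simp [goB, Rspec, goA]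
      | f+1, [n] => simp [goB, Rspec, goA]
      | f+1, n :: z :: t =>
        simp only [List.length_cons] at hlen hf
        by_cases hn : n ≠ 0
        · by_cases hp : 0 < n
          · -- push a fresh frame, then the KC component describes the whole subtree read
            have h1 : goB f t ((n, z, []) :: st) = goB (t.length + 1) t ((n, z, []) :: st) := by
              rw [(IH (ℓ-1) (by omega)).1 t ((n, z, []) :: st) f (by omega) (by omega),
                  (IH (ℓ-1) (by omega)).1 t ((n, z, []) :: st) (t.length + 1) (by omega) (by omega)]
            have h2 := (IH (ℓ-1) (by omega)).2 t st n z [] n.toNat (t.length + 2)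
              (by omega) (by omega) (by omega) (by simp; omega)
            simp only [goB, if_pos hn, if_pos hp, h1, h2, Rspec]
            simp only [goA, if_pos hn, List.length_cons]
            cases hk : kidsA (t.length + 2) n.toNat t [] with
            | none => rfl
            | some p =>
              obtain ⟨s', t1⟩ := p
              simp only [metaA_eq_metaIdxB]
          · -- n < 0: the new frame completes immediately with s = []
            have hkid : kidsA (t.length + 2) n.toNat t [] = some ([], t) := by
              have : n.toNat = 0 := by omega
              simp [this, kidsA]
            simp only [goB, if_pos hn, if_neg hp, Rspec]
            simp only [goA, if_pos hn, List.length_cons, hkid, metaA_eq_metaIdxB]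
            cases hm : metaIdxB z [] t with
            | none => simp [contB]
            | some p =>
              obtain ⟨v, t'⟩ := p
              have ht' : t'.length ≤ t.length := metaIdxB_len hm
              simp only [contB]
              cases ha : attachB t' st v with
              | none => rfl
              | some r =>
                cases r with
                | inl v' => rfl
                | inr q =>
                  obtain ⟨t2, st2⟩ := q
                  have ht2 : t2.length ≤ t'.length := attachB_inr_len st t' v t2 st2 ha
                  show goB f t2 st2 = goB (t2.length + 1) t2 st2
                  rw [(IH (ℓ-1) (by omega)).1 t2 st2 f (by omega) (by omega),
                      (IH (ℓ-1) (by omega)).1 t2 st2 (t2.length + 1) (by omega) (by omega)]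
        · -- n = 0: leaf, metadata summed directly
          simp only [goB, if_neg hn, Rspec]
          simp only [goA, if_neg hn, List.length_cons, leafA_eq_metaSumB]
          cases hm : metaSumB z t with
          | none => simp [contB]
          | some p =>
            obtain ⟨v, t'⟩ := p
            have ht' : t'.length ≤ t.length := metaSumB_len hm
            simp only [contB]
            cases ha : attachB t' st v with
            | none => rfl
            | some r =>
              cases r with
              | inl v' => rfl
              | inr q =>
                obtain ⟨t2, st2⟩ := q
                have ht2 : t2.length ≤ t'.length := attachB_inr_len st t' v t2 st2 ha
                show goB f t2 st2 = goB (t2.length + 1) t2 st2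
                rw [(IH (ℓ-1) (by omega)).1 t2 st2 f (by omega) (by omega),
                    (IH (ℓ-1) (by omega)).1 t2 st2 (t2.length + 1) (by omega) (by omega)]
    refine ⟨hL, ?_⟩
    intro t st n z s k g hlen hg hk hns
    rw [hL t ((n, z, s) :: st) (t.length + 1) hlen (Nat.lt_succ_self _)]
    unfold Rspec
    obtain ⟨k, rfl⟩ : ∃ k', k = k' + 1 := ⟨k - 1, by omega⟩
    cases hA : goA (t.length + 1) t with
    | none =>
      have : goA g t = none := by
        rw [(stabA t.length).1 t g (t.length + 1) le_rfl hg (Nat.lt_succ_self _), hA]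
      simp only [kidsA, this]
    | some p =>
      obtain ⟨v1, t1⟩ := p
      have hg1 : goA g t = some (v1, t1) := by
        rw [(stabA t.length).1 t g (t.length + 1) le_rfl hg (Nat.lt_succ_self _), hA]
      have hlen1 := goA_len hA
      simp only [kidsA, hg1]
      simp only [attachB, List.length_append, List.length_cons]
      by_cases h2 : ((s.length + 1 : Nat) : Int) < n
      · -- more children still to come: attach yields inr, recurse into the next child
        rw [if_pos (by simpa using h2)]
        have := (IH (ℓ-1) (by omega)).2 t1 st n z (s ++ [v1]) k g
          (by omega) (by omega) (by omega) (by simp; omega)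
        exact this
      · -- last child: the frame completes, metadata read, value cascades upward
        rw [if_neg (by simpa using h2)]
        have hk0 : k = 0 := by omega
        subst hk0
        simp only [kidsA]
        cases hm : metaIdxB z (s ++ [v1]) t1 with
        | none => rfl
        | some q =>
          obtain ⟨v', t'⟩ := q
          cases ha : attachB t' st v' with
          | none => rfl
          | some r => cases r with
            | inl _ => rfl
            | inr q2 => obtain ⟨t2, st2⟩ := q2; rfl

-- ===== VERDICT (by name: the statement is the Claim_ definition above) =====
theorem treeval_spec : Claim_equal_treeval := by
  unfold Claim_equal_treeval
  intro tree _ _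
  unfold Spec_treeval treeval treeval_alt
  rw [(mainL tree.length).1 tree [] (tree.length + 1) le_rfl (Nat.lt_succ_self _)]
  unfold Rspec
  cases hA : goA (tree.length + 1) tree with
  | none => rfl
  | some p => obtain ⟨v, t'⟩ := p; simp [attachB]
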